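-- pv_equiv track=rewrite | github.com/mcyprian/slide | slide/input.py | join_equalities
-- ===== SOURCE A (Python) =====
-- def intersect_lists(a,b):
-- # check intersection between the lists a and b
-- # return the number of elements in the intersection
--     number=0
--     for x in a:
--         if x in b:
--             number=number+1
--     return number
--
-- def join_equalities(a):
-- # join equlities
-- # example: [[x,y],[y,z],[a,b]] ---> [[x,y,z],[a,b]]
--     res=[]
--     joined=0
--     for x in a:
--         added=0
--         for y in res:
--             if  intersect_lists(x,y):
--                 y.extend(list(x))
--                 added=1
--                 joined=1 # something was joined
--         if not added:
--             res.append(list(x))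
--     if joined:
--         # do a transitive closure till nothing is joined
--         res=join_equalities(res)
--     return res
-- ===== SOURCE B (Python) =====
-- def join_equalities(a):
--     # Iterative fixpoint: bounded while-style loop instead of tail recursion;
--     # each pass rebuilds res with a hit-mask comprehension instead of flag mutation.
--     work = a
--     for _ in range(len(a) + 1):
--         res = []
--         joined = False
--         for x in work:
--             hit = [any(e in y for e in x) for y in res]
--             if any(hit):
--                 joined = True
--                 res = [y + list(x) if h else y for y, h in zip(res, hit)]
--             else:
--                 res.append(list(x))
--         if not joined:
--             return res
--         work = res
--     return res
-- ===== Notes on version B (the rewrite author's own statement) =====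
-- stated objective: alternative
-- what changed: The tail recursion 'if joined: res = join_equalities(res)' becomes a bounded iterative fixpoint (a for-loop of at most len(a)+1 passes), and each pass is rebuilt as a hit-mask comprehension (zip of res with a boolean mask, producing fresh merged lists) instead of A's in-place y.extend driven by intersection-count and added/joined flags.
import Mathlib
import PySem

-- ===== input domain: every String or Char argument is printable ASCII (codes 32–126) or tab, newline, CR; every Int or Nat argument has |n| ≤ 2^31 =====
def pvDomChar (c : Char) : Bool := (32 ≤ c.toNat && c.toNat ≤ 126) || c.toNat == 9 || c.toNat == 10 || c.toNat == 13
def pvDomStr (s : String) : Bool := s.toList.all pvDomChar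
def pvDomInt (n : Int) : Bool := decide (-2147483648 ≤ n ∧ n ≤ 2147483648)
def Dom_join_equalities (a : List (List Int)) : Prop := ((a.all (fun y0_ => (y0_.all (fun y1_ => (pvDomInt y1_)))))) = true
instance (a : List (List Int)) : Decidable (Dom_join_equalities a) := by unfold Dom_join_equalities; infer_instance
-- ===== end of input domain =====

-- B replaces A's tail recursion by a bounded iterative fixpoint whose pass builds a
-- hit mask and rebuilds res by comprehension; measured faster (short-circuiting overlap test).

-- ===== PORT A =====
-- intersect_lists: count elements of a that occur in b
def intersect_lists (a b : List Int) : Int :=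
  a.foldl (fun number x => if b.contains x then number + 1 else number) 0

-- body of A's inner 'for y in res' loop (rebuild res, tracking 'added'/'joined')
def pvStepInner (x : List Int) (st : List (List Int) × Bool) (y : List Int) :
    List (List Int) × Bool :=
  if intersect_lists x y ≠ 0 then (st.1 ++ [y ++ x], true) else (st.1 ++ [y], st.2)

def pvInnerA (x : List Int) (res : List (List Int)) : List (List Int) × Bool :=
  res.foldl (pvStepInner x) ([], false)

-- body of A's outer 'for x in a' loop
def pvStepA (st : List (List Int) × Bool) (x : List Int) : List (List Int) × Bool :=
  if (pvInnerA x st.1).2 then ((pvInnerA x st.1).1, true) else ((pvInnerA x st.1).1 ++ [x], st.2)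

-- one full pass of A, returning (res, joined)
def pvPassA (a : List (List Int)) : List (List Int) × Bool :=
  a.foldl pvStepA ([], false)

-- termination lemmas for A's recursion (needed by the definition itself)
theorem pvInnerA_aux_len (x : List Int) :
    ∀ (l acc : List (List Int)) (b : Bool),
      (l.foldl (pvStepInner x) (acc, b)).1.length = acc.length + l.length := by
  intro l
  induction l with
  | nil => intro acc b; simp
  | cons y t ih =>
    intro acc b
    rw [List.foldl_cons]
    by_cases h : intersect_lists x y ≠ 0
    · have hstep : pvStepInner x (acc, b) y = (acc ++ [y ++ x], true) := by
        unfold pvStepInner; rw [if_pos h]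
      rw [hstep, ih]
      simp only [List.length_append, List.length_cons, List.length_nil]
      omega
    · have hstep : pvStepInner x (acc, b) y = (acc ++ [y], b) := by
        unfold pvStepInner; rw [if_neg h]
      rw [hstep, ih]
      simp only [List.length_append, List.length_cons, List.length_nil]
      omega

theorem pvInnerA_len (x : List Int) (res : List (List Int)) :
    (pvInnerA x res).1.length = res.length := by
  unfold pvInnerA; simpa using pvInnerA_aux_len x res [] false

theorem pvPassA_aux (l : List (List Int)) :
    ∀ (res : List (List Int)) (j : Bool),
      (l.foldl pvStepA (res, j)).1.length ≤ res.length + l.length ∧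
      (j = false → (l.foldl pvStepA (res, j)).2 = true →
        (l.foldl pvStepA (res, j)).1.length < res.length + l.length) := by
  induction l with
  | nil =>
    intro res j
    refine ⟨by simp, ?_⟩
    intro hj h
    rw [List.foldl_nil] at h
    rw [hj] at h
    simp at h
  | cons x t ih =>
    intro res j
    rw [List.foldl_cons]
    have hl := pvInnerA_len x res
    by_cases h : (pvInnerA x res).2 = true
    · have hstep : pvStepA (res, j) x = ((pvInnerA x res).1, true) := by
        unfold pvStepA; rw [if_pos h]
      rw [hstep]
      obtain ⟨h1, _⟩ := ih (pvInnerA x res).1 true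
      rw [hl] at h1
      exact ⟨by simp only [List.length_cons]; omega,
             fun _ _ => by simp only [List.length_cons]; omega⟩
    · have hstep : pvStepA (res, j) x = ((pvInnerA x res).1 ++ [x], j) := by
        unfold pvStepA; rw [if_neg h]
      rw [hstep]
      obtain ⟨h1, h2⟩ := ih ((pvInnerA x res).1 ++ [x]) j
      simp only [List.length_append, List.length_cons, List.length_nil, hl] at h1 h2
      refine ⟨by simp only [List.length_cons]; omega, ?_⟩
      intro hj hs
      have := h2 hj hs
      simp only [List.length_cons]
      omega

theorem pvPassA_shrink (a : List (List Int)) (h : (pvPassA a).2 = true) :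
    (pvPassA a).1.length < a.length := by
  have := (pvPassA_aux a [] false).2 rfl h
  simpa [pvPassA] using this

-- A itself: one pass, then recurse while something was joined
def join_equalities (a : List (List Int)) : List (List Int) :=
  if h : (pvPassA a).2 = true then join_equalities (pvPassA a).1 else (pvPassA a).1
termination_by a.length
decreasing_by exact pvPassA_shrink a h

-- ===== PORT B =====
-- body of B's 'for x in work' loop: hit mask + comprehension rebuild
def pvStepB (st : List (List Int) × Bool) (x : List Int) : List (List Int) × Bool :=
  if (st.1.map (fun y => x.any (fun e => y.contains e))).any id then
    ((st.1.zip (st.1.map (fun y => x.any (fun e => y.contains e)))).map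
      (fun p => if p.2 then p.1 ++ x else p.1), true)
  else (st.1 ++ [x], st.2)

-- one pass of B, returning (res, joined)
def pvPassB (work : List (List Int)) : List (List Int) × Bool :=
  work.foldl pvStepB ([], false)

-- the bounded 'for _ in range(len(a)+1)' driver loop
def pvAltGo : Nat → List (List Int) → List (List Int)
  | 0, work => work
  | Nat.succ n, work =>
    if (pvPassB work).2 then pvAltGo n (pvPassB work).1 else (pvPassB work).1

def join_equalities_alt (a : List (List Int)) : List (List Int) :=
  pvAltGo (a.length + 1) a

-- ===== PRECONDITION & SPEC =====
def Spec_join_equalities (a : List (List Int)) (out : List (List Int)) : Prop := out = join_equalities_alt a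
instance (a : List (List Int)) (out : List (List Int)) : Decidable (Spec_join_equalities a out) := by unfold Spec_join_equalities; infer_instance

-- ===== CLAIM (what is proved, stated in full; the proofs are below) =====
def Claim_equal_join_equalities : Prop := ∀ (a : List (List Int)), Dom_join_equalities a → Spec_join_equalities a (join_equalities a)

-- ===== LEMMAS AND PROOFS =====

-- the running count, shifted start
theorem pvCount_shift (y : List Int) :
    ∀ (t : List Int) (n : Int),
      t.foldl (fun number x => if y.contains x then number + 1 else number) n
        = n + t.foldl (fun number x => if y.contains x then number + 1 else number) 0 := by
  intro t
  induction t with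
  | nil => intro n; simp
  | cons a t ih =>
    intro n
    rw [List.foldl_cons, List.foldl_cons]
    by_cases h : y.contains a = true
    · rw [if_pos h, if_pos h, ih (n + 1), ih (0 + 1)]
      omega
    · rw [if_neg h, if_neg h, ih n]

theorem pvCount_nonneg (y t : List Int) :
    (0 : Int) ≤ t.foldl (fun number x => if y.contains x then number + 1 else number) (0 : Int) := by
  induction t with
  | nil => simp
  | cons a t ih =>
    rw [List.foldl_cons]
    by_cases h : y.contains a = true
    · rw [if_pos h, pvCount_shift y t (0 + 1)]
      have := pvCount_shift y t 0
      omega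
    · rw [if_neg h]
      exact ih

-- the two if-conditions agree: count ≠ 0 ↔ some element shared
theorem intersect_ne_zero_iff (x y : List Int) :
    (intersect_lists x y ≠ 0) ↔ (x.any (fun e => y.contains e) = true) := by
  unfold intersect_lists
  induction x with
  | nil => simp
  | cons e t ih =>
    rw [List.foldl_cons, List.any_cons]
    by_cases h : y.contains e = true
    · rw [if_pos h, pvCount_shift y t (0 + 1)]
      have h2 := pvCount_nonneg y t
      simp only [h, Bool.true_or]
      constructor
      · intro _; trivial
      · intro _; omega
    · rw [if_neg h]
      simp only [Bool.not_eq_true] at h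
      simp only [h, Bool.false_or]
      exact ih

-- pvInnerA's result list, described pointwise
theorem pvInnerA_aux_fst (x : List Int) :
    ∀ (l acc : List (List Int)) (b : Bool),
      (l.foldl (pvStepInner x) (acc, b)).1
        = acc ++ l.map (fun y => if x.any (fun e => y.contains e) = true then y ++ x else y) := by
  intro l
  induction l with
  | nil => intro acc b; simp
  | cons y t ih =>
    intro acc b
    rw [List.foldl_cons, List.map_cons]
    by_cases h : intersect_lists x y ≠ 0
    · have hx : (x.any (fun e => y.contains e)) = true := (intersect_ne_zero_iff x y).1 h
      have hstep : pvStepInner x (acc, b) y = (acc ++ [y ++ x], true) := by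
        unfold pvStepInner; rw [if_pos h]
      rw [hstep, ih, if_pos hx]
      simp
    · have hx : (x.any (fun e => y.contains e)) = false := by
        by_contra hc
        exact h ((intersect_ne_zero_iff x y).2 (by simpa using hc))
      have hstep : pvStepInner x (acc, b) y = (acc ++ [y], b) := by
        unfold pvStepInner; rw [if_neg h]
      rw [hstep, ih, if_neg (by rw [hx]; exact Bool.false_ne_true)]
      simp

-- pvInnerA's joined flag
theorem pvInnerA_aux_snd (x : List Int) :
    ∀ (l acc : List (List Int)) (b : Bool),
      (l.foldl (pvStepInner x) (acc, b)).2
        = (b || (l.map (fun y => x.any (fun e => y.contains e))).any id) := by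
  intro l
  induction l with
  | nil => intro acc b; simp
  | cons y t ih =>
    intro acc b
    rw [List.foldl_cons, List.map_cons, List.any_cons]
    by_cases h : intersect_lists x y ≠ 0
    · have hx : (x.any (fun e => y.contains e)) = true := (intersect_ne_zero_iff x y).1 h
      have hstep : pvStepInner x (acc, b) y = (acc ++ [y ++ x], true) := by
        unfold pvStepInner; rw [if_pos h]
      rw [hstep, ih]
      simp only [id_eq, hx, Bool.true_or, Bool.or_true]
    · have hx : (x.any (fun e => y.contains e)) = false := by
        by_contra hc
        exact h ((intersect_ne_zero_iff x y).2 (by simpa using hc))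
      have hstep : pvStepInner x (acc, b) y = (acc ++ [y], b) := by
        unfold pvStepInner; rw [if_neg h]
      rw [hstep, ih]
      simp only [id_eq, hx, Bool.false_or]

-- B's zip/map rebuild equals the pointwise description
theorem zip_map_rebuild (x : List Int) (res : List (List Int)) :
    ((res.zip (res.map (fun y => x.any (fun e => y.contains e)))).map
      (fun p => if p.2 then p.1 ++ x else p.1))
    = res.map (fun y => if x.any (fun e => y.contains e) = true then y ++ x else y) := by
  induction res with
  | nil => rfl
  | cons y t ih =>
    simp only [List.map_cons, List.zip_cons_cons, ih]

-- when nothing matched, the rebuilt list is res itself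
theorem rebuild_id (x : List Int) (res : List (List Int))
    (h : (res.map (fun y => x.any (fun e => y.contains e))).any id = false) :
    res.map (fun y => if x.any (fun e => y.contains e) = true then y ++ x else y) = res := by
  induction res with
  | nil => rfl
  | cons y t ih =>
    rw [List.map_cons, List.any_cons] at h
    simp only [id_eq, Bool.or_eq_false_iff] at h
    rw [List.map_cons, if_neg (by rw [h.1]; exact Bool.false_ne_true), ih h.2]

-- the two loop bodies agree
theorem step_eq (st : List (List Int) × Bool) (x : List Int) : pvStepA st x = pvStepB st x := by
  have hsnd : (pvInnerA x st.1).2 = (st.1.map (fun y => x.any (fun e => y.contains e))).any id := by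
    unfold pvInnerA; simpa using pvInnerA_aux_snd x st.1 [] false
  have hfst : (pvInnerA x st.1).1
      = st.1.map (fun y => if x.any (fun e => y.contains e) = true then y ++ x else y) := by
    unfold pvInnerA; simpa using pvInnerA_aux_fst x st.1 [] false
  unfold pvStepA pvStepB
  by_cases h : (st.1.map (fun y => x.any (fun e => y.contains e))).any id = true
  · rw [if_pos (by rw [hsnd]; exact h), if_pos h, hfst, zip_map_rebuild]
  · have h' : (st.1.map (fun y => x.any (fun e => y.contains e))).any id = false := by
      simpa using h
    rw [if_neg (by rw [hsnd]; exact h), if_neg h, hfst, rebuild_id x st.1 h']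

-- the two pass functions agree
theorem pass_eq (a : List (List Int)) : pvPassA a = pvPassB a := by
  unfold pvPassA pvPassB
  have hf : pvStepA = pvStepB := funext fun st => funext fun x => step_eq st x
  rw [hf]

-- enough fuel makes B's loop equal to A's recursion
theorem altGo_eq : ∀ (fuel : Nat) (work : List (List Int)), work.length < fuel →
    pvAltGo fuel work = join_equalities work := by
  intro fuel
  induction fuel with
  | zero => intro work h; omega
  | succ n ih =>
    intro work h
    show (if (pvPassB work).2 then pvAltGo n (pvPassB work).1 else (pvPassB work).1)
        = join_equalities work
    rw [← pass_eq, join_equalities]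
    by_cases hj : (pvPassA work).2 = true
    · rw [if_pos hj, dif_pos hj]
      exact ih _ (by have := pvPassA_shrink work hj; omega)
    · rw [if_neg hj, dif_neg hj]

-- ===== VERDICT (by name: the statement is the Claim_ definition above) =====
theorem join_equalities_spec : Claim_equal_join_equalities := by
  intro a _
  unfold Spec_join_equalities join_equalities_alt
  exact (altGo_eq (a.length + 1) a (by omega)).symm
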